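-- pv_equiv track=rewrite | github.com/htrnguyen/ag-core | .agent/scripts/checklist.py | _estimate_html_nesting
-- ===== SOURCE A (Python) =====
-- def _estimate_html_nesting(content: str) -> int:
--     """Estimate HTML nesting depth."""
--     depth = 0
--     max_depth = 0
--     for char in content:
--         if char == "<":
--             depth += 1
--             max_depth = max(max_depth, depth)
--         elif char == ">":
--             depth = max(0, depth - 1)
--     return max_depth // 2
-- ===== SOURCE B (Python) =====
-- from itertools import accumulate
--
-- def _estimate_html_nesting(content: str) -> int:
--     """Estimate HTML nesting depth via unclamped prefix sums and max drawup."""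
--     deltas = [1 if c == "<" else -1 if c == ">" else 0 for c in content]
--     psums = [0] + list(accumulate(deltas))
--     pmins = list(accumulate(psums, min))
--     return max(p - lo for p, lo in zip(psums, pmins)) // 2
-- ===== Notes on version B (the rewrite author's own statement) =====
-- stated objective: alternative
-- what changed: Replaces the clamped depth counter with running max by a max-drawup computation on unclamped prefix sums: brackets map to +1/-1, prefix sums are materialized, a prefix-minimum sequence is taken, and the answer is the maximum of prefix[j]-min(prefix[0..j]) halved; correctness rests on the identity that the clamped depth equals the current prefix sum minus its running minimum.
import Mathlib
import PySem

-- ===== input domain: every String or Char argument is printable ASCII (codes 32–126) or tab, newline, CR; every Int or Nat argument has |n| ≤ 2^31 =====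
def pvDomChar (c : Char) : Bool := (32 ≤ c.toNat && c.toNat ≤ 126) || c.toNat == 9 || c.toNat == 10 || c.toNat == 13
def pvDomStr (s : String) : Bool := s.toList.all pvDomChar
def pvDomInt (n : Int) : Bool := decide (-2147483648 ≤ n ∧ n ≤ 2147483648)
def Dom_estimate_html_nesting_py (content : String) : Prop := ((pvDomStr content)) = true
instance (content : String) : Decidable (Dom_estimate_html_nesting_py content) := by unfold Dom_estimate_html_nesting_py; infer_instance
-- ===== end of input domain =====

-- B replaces A's clamped depth counter + running max by a max-drawup over unclamped prefix sums (prefix sums, prefix minima, max difference); alternative algorithm, same cost.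


-- ===== PORT A =====
-- one loop, state (depth, max_depth)
def pvStepA (st : Int × Int) (c : Char) : Int × Int :=
  if c = '<' then (st.1 + 1, max st.2 (st.1 + 1))
  else if c = '>' then (max 0 (st.1 - 1), st.2)
  else st

def estimate_html_nesting_py (content : String) : Int :=
  PySem.Int.floordiv (content.toList.foldl pvStepA (0, 0)).2 2

-- ===== PORT B =====
-- brackets map to +1/-1/0
def pvVal (c : Char) : Int := if c = '<' then 1 else if c = '>' then -1 else 0

-- pass 1: deltas; pass 2: prefix sums (with leading 0); pass 3: prefix minima; pass 4: max drawup
def estimate_html_nesting_py_alt (content : String) : Int :=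
  let deltas := content.toList.map pvVal
  let psums := List.scanl (· + ·) 0 deltas
  let pmins := List.scanl min psums.headI psums.tail
  let diffs := List.zipWith (· - ·) psums pmins
  PySem.Int.floordiv (diffs.tail.foldl max diffs.headI) 2

-- ===== PRECONDITION & SPEC =====
def Spec_estimate_html_nesting_py (content : String) (out : Int) : Prop := out = estimate_html_nesting_py_alt content
instance (content : String) (out : Int) : Decidable (Spec_estimate_html_nesting_py content out) := by unfold Spec_estimate_html_nesting_py; infer_instance

-- ===== CLAIM =====
def Claim_equal_estimate_html_nesting_py : Prop := ∀ (content : String), Dom_estimate_html_nesting_py content → Spec_estimate_html_nesting_py content (estimate_html_nesting_py content)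

-- ===== LEMMAS AND PROOFS =====

-- drawup stream: element-wise (value - running minimum), m = min of all earlier values
def pvW (m : Int) : List Int → List Int
  | [] => []
  | y :: ys => (y - min m y) :: pvW (min m y) ys

-- scanl over a mapped list
theorem pv_scanl_map (cs : List Char) : ∀ (q : Int),
    List.scanl (· + ·) q (cs.map pvVal) = List.scanl (fun s c => s + pvVal c) q cs := by
  induction cs with
  | nil => intro q; rfl
  | cons c cs ih => intro q; rw [List.map_cons, List.scanl_cons, List.scanl_cons, ih]

-- the port's zipWith of a list against its own prefix-min scan is pvW
theorem pv_zip_scanl_min : ∀ (ys : List Int) (m y : Int),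
    List.zipWith (· - ·) (y :: ys) (List.scanl min (min m y) ys) = pvW m (y :: ys) := by
  intro ys
  induction ys with
  | nil => intro m y; rw [List.scanl_nil]; simp [pvW]
  | cons z zs ih =>
    intro m y
    rw [List.scanl_cons, List.zipWith_cons_cons, ih (min m y) z]
    simp [pvW]

-- head of pvW over a scanl
theorem pv_head (cs : List Char) (q m : Int) :
    ∃ rest, pvW m (List.scanl (fun s c => s + pvVal c) q cs) = (q - min m q) :: rest := by
  cases cs with
  | nil => exact ⟨[], by rw [List.scanl_nil]; simp [pvW]⟩
  | cons a l =>
    exact ⟨pvW (min m q) (List.scanl (fun s c => s + pvVal c) (q + pvVal a) l),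
      by rw [List.scanl_cons]; simp [pvW]⟩

-- the running minimum before the head of a scanl may absorb the head
theorem pv_absorb (cs : List Char) (M y : Int) :
    pvW (min M y) (List.scanl (fun s c => s + pvVal c) y cs)
      = pvW M (List.scanl (fun s c => s + pvVal c) y cs) := by
  cases cs with
  | nil => rw [List.scanl_nil]; simp [pvW]
  | cons a l => rw [List.scanl_cons]; simp [pvW]

-- A's loop invariant: running max over the fold = max-fold over the drawup stream,
-- with depth = psum - running min = max (q - m) 0
theorem pv_main : ∀ (cs : List Char) (q m a : Int), max (q - m) 0 ≤ a →
    (cs.foldl pvStepA (max (q - m) 0, a)).2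
      = (pvW m (List.scanl (fun s c => s + pvVal c) q cs)).foldl max a := by
  intro cs
  induction cs with
  | nil =>
    intro q m a h
    rw [List.scanl_nil]
    simp only [List.foldl_nil, pvW, List.foldl_cons]
    omega
  | cons c cs ih =>
    intro q m a h
    rw [List.scanl_cons, List.foldl_cons]
    simp only [pvW, List.foldl_cons]
    have hmaD : max a (q - min m q) = a := by omega
    rw [hmaD]
    by_cases h1 : c = '<'
    · subst h1
      have hv : pvVal '<' = 1 := by simp [pvVal]
      have hstep : pvStepA (max (q - m) 0, a) '<'
          = (max ((q + pvVal '<') - min m q) 0, max a (max (q - m) 0 + 1)) := by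
        simp [pvStepA, hv, Prod.ext_iff] <;> omega
      rw [hstep,
        ih (q + pvVal '<') (min m q) (max a (max (q - m) 0 + 1)) (by rw [hv]; omega)]
      obtain ⟨rest, hr⟩ := pv_head cs (q + pvVal '<') (min m q)
      rw [hr, List.foldl_cons, List.foldl_cons]
      congr 1
      rw [hv]; omega
    · by_cases h2 : c = '>'
      · subst h2
        have hv : pvVal '>' = -1 := by simp [pvVal]
        have hstep : pvStepA (max (q - m) 0, a) '>'
            = (max ((q + pvVal '>') - min (min m q) (q + pvVal '>')) 0, a) := by
          simp [pvStepA, hv, Prod.ext_iff] <;> omega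
        rw [hstep,
          ih (q + pvVal '>') (min (min m q) (q + pvVal '>')) a (by rw [hv]; omega),
          pv_absorb cs (min m q) (q + pvVal '>')]
      · have hv : pvVal c = 0 := by simp [pvVal, h1, h2]
        have hstep : pvStepA (max (q - m) 0, a) c
            = (max ((q + pvVal c) - min m q) 0, a) := by
          simp [pvStepA, h1, h2, hv, Prod.ext_iff] <;> omega
        have hq : q + pvVal c = q := by omega
        rw [hstep, ih (q + pvVal c) (min m q) a (by omega), hq]

-- specialisation of pv_zip_scanl_min to the start state
theorem pv_zip0 (T : List Int) :
    List.zipWith (· - ·) ((0 : Int) :: T) (List.scanl min 0 T) = pvW 0 (0 :: T) := by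
  have h := pv_zip_scanl_min T 0 0
  simpa using h

-- ===== VERDICT =====
theorem estimate_html_nesting_py_spec : Claim_equal_estimate_html_nesting_py := by
  intro content _
  unfold Spec_estimate_html_nesting_py estimate_html_nesting_py estimate_html_nesting_py_alt
  simp only [pv_scanl_map]
  have h0 : ((0 : Int), (0 : Int)) = (max ((0:Int) - 0) 0, 0) := by norm_num
  rw [h0, pv_main content.toList 0 0 0 (by omega)]
  cases cs : content.toList with
  | nil =>
    rw [List.scanl_nil]
    norm_num [pvW]
  | cons c l =>
    rw [List.scanl_cons]
    simp only [List.headI, List.tail_cons, pv_zip0, pvW]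
    norm_num [List.foldl_cons]
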